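-- pv_equiv track=rewrite | github.com/Crypto-TII/ascon_hybrid_milp_smt | milp/weight/script_gen_ineq.py | str_eq
-- ===== SOURCE A (Python) =====
-- def check(x, y):
--     a = 0
--     if x == y:
--         a = 1
--     elif x == y + str("'"):
--         a = -1
--     return a
--
-- def str_eq(X):
--     A = [0]*10
--     for x in X:
--         A[0] |= check(x, 'A')
--         A[1] |= check(x, 'B')
--         A[2] |= check(x, 'C')
--         A[3] |= check(x, 'D')
--         A[4] |= check(x, 'E')
--         A[5] |= check(x, 'F')
--         A[6] |= check(x, 'G')
--         A[7] |= check(x, 'H')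
--         A[8] |= check(x, 'I')
--         A[9] |= check(x, 'J')
--     return A
-- ===== SOURCE B (Python) =====
-- def str_eq(X):
--     S = set(X)
--     return [-1 if c + "'" in S else (1 if c in S else 0) for c in "ABCDEFGHIJ"]
-- ===== Notes on version B (the rewrite author's own statement) =====
-- stated objective: simpler
-- what changed: Builds a membership set of X once and loops over the 10 fixed letters with an if/elif (primed dominates) instead of scanning every element against all 10 letters while bitwise-OR-accumulating into a mutable array.
import Mathlib
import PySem

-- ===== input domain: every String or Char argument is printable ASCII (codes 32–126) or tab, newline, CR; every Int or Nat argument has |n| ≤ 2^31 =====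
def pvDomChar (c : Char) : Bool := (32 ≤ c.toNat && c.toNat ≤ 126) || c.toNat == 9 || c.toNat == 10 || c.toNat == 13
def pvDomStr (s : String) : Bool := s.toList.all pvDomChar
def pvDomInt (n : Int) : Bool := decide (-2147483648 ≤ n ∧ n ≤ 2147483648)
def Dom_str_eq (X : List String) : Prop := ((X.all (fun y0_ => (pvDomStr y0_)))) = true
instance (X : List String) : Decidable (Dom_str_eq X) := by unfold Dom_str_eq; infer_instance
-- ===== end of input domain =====

-- B builds set(X) once and maps over the 10 fixed letters with an if/elif, instead of
-- OR-accumulating a check of every element against each letter; objective: simpler.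

-- ===== PORT A =====
def pvCheck (x y : String) : Int :=
  if x = y then 1 else if x = y ++ "'" then -1 else 0

-- A[i] |= check(x, letter): Python's int | is PySem.Int.bor (exact on negatives)
def pvStep (A : List Int) (x : String) : List Int :=
  [PySem.Int.bor (A.getD 0 0) (pvCheck x "A"), PySem.Int.bor (A.getD 1 0) (pvCheck x "B"),
   PySem.Int.bor (A.getD 2 0) (pvCheck x "C"), PySem.Int.bor (A.getD 3 0) (pvCheck x "D"),
   PySem.Int.bor (A.getD 4 0) (pvCheck x "E"), PySem.Int.bor (A.getD 5 0) (pvCheck x "F"),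
   PySem.Int.bor (A.getD 6 0) (pvCheck x "G"), PySem.Int.bor (A.getD 7 0) (pvCheck x "H"),
   PySem.Int.bor (A.getD 8 0) (pvCheck x "I"), PySem.Int.bor (A.getD 9 0) (pvCheck x "J")]

def str_eq (X : List String) : List Int :=
  X.foldl pvStep [0, 0, 0, 0, 0, 0, 0, 0, 0, 0]

-- ===== PORT B =====
def str_eq_alt (X : List String) : List Int :=
  let S : PySem.Set String := PySem.Set.ofList X
  ["A", "B", "C", "D", "E", "F", "G", "H", "I", "J"].map
    (fun c => if (c ++ "'") ∈ S then -1 else if c ∈ S then 1 else 0)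

-- ===== PRECONDITION & SPEC =====
def Spec_str_eq (X : List String) (out : List Int) : Prop := out = str_eq_alt X
instance (X : List String) (out : List Int) : Decidable (Spec_str_eq X out) := by unfold Spec_str_eq; infer_instance

-- ===== CLAIM (what is proved, stated in full; the proofs are below) =====
def Claim_equal_str_eq : Prop := ∀ (X : List String), Dom_str_eq X → Spec_str_eq X (str_eq X)

-- ===== LEMMAS AND PROOFS =====

-- the value B assigns for letter c
def pvTgt (c : String) (X : List String) : Int :=
  if (c ++ "'") ∈ X then -1 else if c ∈ X then 1 else 0

theorem ne_append_quote (c : String) : c ≠ c ++ "'" := by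
  intro h
  have := congrArg String.length h
  simp [String.length_append] at this

theorem quote_append_ne (c : String) : c ++ "'" ≠ c := fun h => ne_append_quote c h.symm

theorem pvCheck_small (x c : String) :
    pvCheck x c = -1 ∨ pvCheck x c = 0 ∨ pvCheck x c = 1 := by
  unfold pvCheck; split_ifs <;> simp

theorem fold_one (c : String) : ∀ (X : List String) (a : Int),
    (a = -1 ∨ a = 0 ∨ a = 1) →
    X.foldl (fun a x => PySem.Int.bor a (pvCheck x c)) a = PySem.Int.bor a (pvTgt c X) := by
  intro X
  induction X with
  | nil =>
    intro a ha
    rcases ha with rfl | rfl | rfl <;> simp [pvTgt]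
  | cons x X ih =>
    intro a ha
    have hs := pvCheck_small x c
    have ha' : PySem.Int.bor a (pvCheck x c) = -1 ∨ PySem.Int.bor a (pvCheck x c) = 0 ∨
        PySem.Int.bor a (pvCheck x c) = 1 := by
      rcases ha with rfl | rfl | rfl <;> rcases hs with h | h | h <;> rw [h] <;> decide
    rw [List.foldl_cons, ih _ ha']
    unfold pvCheck pvTgt
    simp only [List.mem_cons]
    rcases ha with rfl | rfl | rfl <;>
      split_ifs with h1 h2 h3 h4 h5 h6 h7 h8 <;>
      first
        | decide
        | simp_all [ne_append_quote, quote_append_ne]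

theorem split_fold : ∀ (X : List String) (a0 a1 a2 a3 a4 a5 a6 a7 a8 a9 : Int),
    X.foldl pvStep [a0, a1, a2, a3, a4, a5, a6, a7, a8, a9] =
      [X.foldl (fun a x => PySem.Int.bor a (pvCheck x "A")) a0,
       X.foldl (fun a x => PySem.Int.bor a (pvCheck x "B")) a1,
       X.foldl (fun a x => PySem.Int.bor a (pvCheck x "C")) a2,
       X.foldl (fun a x => PySem.Int.bor a (pvCheck x "D")) a3,
       X.foldl (fun a x => PySem.Int.bor a (pvCheck x "E")) a4,
       X.foldl (fun a x => PySem.Int.bor a (pvCheck x "F")) a5,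
       X.foldl (fun a x => PySem.Int.bor a (pvCheck x "G")) a6,
       X.foldl (fun a x => PySem.Int.bor a (pvCheck x "H")) a7,
       X.foldl (fun a x => PySem.Int.bor a (pvCheck x "I")) a8,
       X.foldl (fun a x => PySem.Int.bor a (pvCheck x "J")) a9] := by
  intro X
  induction X with
  | nil => intro _ _ _ _ _ _ _ _ _ _; rfl
  | cons x X ih =>
    intro a0 a1 a2 a3 a4 a5 a6 a7 a8 a9
    simp only [List.foldl_cons]
    exact ih _ _ _ _ _ _ _ _ _ _
  
theorem zero_bor_tgt (c : String) (X : List String) :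
    PySem.Int.bor 0 (pvTgt c X) = pvTgt c X := by
  unfold pvTgt; split_ifs <;> decide

theorem str_eq_as_tgt (X : List String) :
    str_eq X = ["A", "B", "C", "D", "E", "F", "G", "H", "I", "J"].map (fun c => pvTgt c X) := by
  unfold str_eq
  rw [split_fold]
  simp only [List.map]
  have h : ∀ c : String, X.foldl (fun a x => PySem.Int.bor a (pvCheck x c)) 0 = pvTgt c X := by
    intro c
    rw [fold_one c X 0 (by decide), zero_bor_tgt]
  rw [h, h, h, h, h, h, h, h, h, h]

-- ===== VERDICT (by name: the statement is the Claim_ definition above) =====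
theorem str_eq_spec : Claim_equal_str_eq := by
  intro X _
  unfold Spec_str_eq str_eq_alt
  rw [str_eq_as_tgt]
  simp only [List.map, pvTgt, PySem.Set.mem_ofList]
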